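-- pv_equiv track=rewrite | github.com/conan48/telnet-command-test-tool | MyProject/telnet_app/gui/main_window.py | parse_telnet_output
-- ===== SOURCE A (Python) =====
-- def parse_telnet_output(output):
--     """解析Telnet输出"""
--     data_val = ""
--     result_val = ""
--
--     if output:
--         lines = str(output).splitlines()
--         for line in lines:
--             line = line.strip()
--             if line.startswith("Data:"):
--                 data_val = line[5:].strip()  # 去掉"Data:"前缀
--             elif line.startswith("Result:"):
--                 result_val = line[7:].strip()  # 去掉"Result:"前缀
--
--     return data_val, result_val
-- ===== SOURCE B (Python) =====
-- def parse_telnet_output(output):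
--     """解析Telnet输出 (reverse scan: take the last Data:/Result: line, stop early)"""
--     data_val = ""
--     result_val = ""
--     if output:
--         lines = str(output).splitlines()
--         got_data = False
--         got_result = False
--         for line in reversed(lines):
--             if got_data and got_result:
--                 break
--             line = line.strip()
--             if not got_data and line.startswith("Data:"):
--                 data_val = line[5:].strip()
--                 got_data = True
--             elif not got_result and line.startswith("Result:"):
--                 result_val = line[7:].strip()
--                 got_result = True
--     return data_val, result_val
-- ===== Notes on version B (the rewrite author's own statement) =====
-- stated objective: alternative
-- what changed: B scans the lines in reverse with got_data/got_result flags and breaks as soon as both are found (first match in reverse = last match forward), instead of A's forward loop that keeps overwriting the values.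
import Mathlib
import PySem

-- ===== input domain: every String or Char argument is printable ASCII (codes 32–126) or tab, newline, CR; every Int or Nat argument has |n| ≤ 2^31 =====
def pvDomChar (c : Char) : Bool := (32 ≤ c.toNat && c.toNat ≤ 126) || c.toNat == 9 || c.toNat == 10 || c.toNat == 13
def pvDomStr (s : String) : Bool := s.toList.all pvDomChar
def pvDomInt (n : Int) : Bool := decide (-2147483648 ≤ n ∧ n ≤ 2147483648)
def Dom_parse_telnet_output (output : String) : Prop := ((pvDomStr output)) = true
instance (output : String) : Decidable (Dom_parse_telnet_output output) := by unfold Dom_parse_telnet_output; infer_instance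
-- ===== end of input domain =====

-- B: reverse scan with got_data/got_result flags, breaking once both are found (first match in
-- reverse = last match forward); alternative decomposition, same asymptotic cost.

-- ===== PORT A =====
def pvStepA (st : String × String) (line : String) : String × String :=
  let l := PySem.Str.strip line
  if PySem.Str.startswith l "Data:" then
    (PySem.Str.strip (PySem.Str.slice l (some 5) none), st.2)
  else if PySem.Str.startswith l "Result:" then
    (st.1, PySem.Str.strip (PySem.Str.slice l (some 7) none))
  else st

def parse_telnet_output (output : String) : String × String :=
  if output = "" then ("", "")
  else (PySem.Str.splitlines output).foldl pvStepA ("", "")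

-- ===== PORT B =====
def pvScanB : List String → Bool → Bool → String → String → String × String
  | [], _, _, d, r => (d, r)
  | line :: rest, gd, gr, d, r =>
    if gd && gr then (d, r)
    else
      let l := PySem.Str.strip line
      if !gd && PySem.Str.startswith l "Data:" then
        pvScanB rest true gr (PySem.Str.strip (PySem.Str.slice l (some 5) none)) r
      else if !gr && PySem.Str.startswith l "Result:" then
        pvScanB rest gd true d (PySem.Str.strip (PySem.Str.slice l (some 7) none))
      else pvScanB rest gd gr d r

def parse_telnet_output_alt (output : String) : String × String :=
  if output = "" then ("", "")
  else pvScanB (PySem.Str.splitlines output).reverse false false "" ""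

-- ===== PRECONDITION & SPEC =====
def Spec_parse_telnet_output (output : String) (out : String × String) : Prop := out = parse_telnet_output_alt output
instance (output : String) (out : String × String) : Decidable (Spec_parse_telnet_output output out) := by unfold Spec_parse_telnet_output; infer_instance

-- ===== CLAIM (what is proved, stated in full; the proofs are below) =====
def Claim_equal_parse_telnet_output : Prop := ∀ (output : String), Dom_parse_telnet_output output → Spec_parse_telnet_output output (parse_telnet_output output)

-- ===== LEMMAS AND PROOFS =====

-- payload of a "Data:" line (none otherwise)
def pvFD (line : String) : Option String :=
  let l := PySem.Str.strip line
  if PySem.Str.startswith l "Data:" then some (PySem.Str.strip (PySem.Str.slice l (some 5) none)) else none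

-- payload of a "Result:" line, with A's elif guard (none otherwise)
def pvFR (line : String) : Option String :=
  let l := PySem.Str.strip line
  if PySem.Str.startswith l "Data:" then none
  else if PySem.Str.startswith l "Result:" then some (PySem.Str.strip (PySem.Str.slice l (some 7) none)) else none

theorem pvDisj (l : String) (h : PySem.Str.startswith l "Data:" = true) :
    PySem.Str.startswith l "Result:" = false := by
  by_contra hc
  rw [Bool.not_eq_false] at hc
  rw [PySem.Str.startswith_eq, PySem.Chars.startswith_iff] at h hc
  obtain ⟨t1, e1⟩ := h
  obtain ⟨t2, e2⟩ := hc
  have h1 : l.toList.head? = some 'D' := by rw [← e1]; rfl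
  have h2 : l.toList.head? = some 'R' := by rw [← e2]; rfl
  rw [h1] at h2
  simp at h2

theorem pvOrSome (o : Option String) (v d : String) : (o.or (some v)).getD d = o.getD v := by
  cases o <;> rfl

theorem pvOrNone (o : Option String) (d : String) : (o.or none).getD d = o.getD d := by
  cases o <;> rfl

theorem pvFoldA (ls : List String) (d r : String) :
    ls.foldl pvStepA (d, r) =
      ((ls.reverse.findSome? pvFD).getD d, (ls.reverse.findSome? pvFR).getD r) := by
  induction ls generalizing d r with
  | nil => simp
  | cons line rest ih =>
    rw [List.foldl_cons, List.reverse_cons, List.findSome?_append, List.findSome?_append]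
    by_cases hd : PySem.Str.startswith (PySem.Str.strip line) "Data:" = true
    · have h1 : List.findSome? pvFD [line] =
          some (PySem.Str.strip (PySem.Str.slice (PySem.Str.strip line) (some 5) none)) := by
        simp only [List.findSome?_cons, List.findSome?_nil, pvFD]
        rw [if_pos hd]
      have h2 : List.findSome? pvFR [line] = none := by
        simp only [List.findSome?_cons, List.findSome?_nil, pvFR]
        rw [if_pos hd]
      have hst : pvStepA (d, r) line =
          (PySem.Str.strip (PySem.Str.slice (PySem.Str.strip line) (some 5) none), r) := by
        simp only [pvStepA]; rw [if_pos hd]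
      rw [hst, ih, h1, h2, pvOrSome, pvOrNone]
    · by_cases hr : PySem.Str.startswith (PySem.Str.strip line) "Result:" = true
      · have h1 : List.findSome? pvFD [line] = none := by
          simp only [List.findSome?_cons, List.findSome?_nil, pvFD]
          rw [if_neg hd]
        have h2 : List.findSome? pvFR [line] =
            some (PySem.Str.strip (PySem.Str.slice (PySem.Str.strip line) (some 7) none)) := by
          simp only [List.findSome?_cons, List.findSome?_nil, pvFR]
          rw [if_neg hd, if_pos hr]
        have hst : pvStepA (d, r) line =
            (d, PySem.Str.strip (PySem.Str.slice (PySem.Str.strip line) (some 7) none)) := by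
          simp only [pvStepA]; rw [if_neg hd, if_pos hr]
        rw [hst, ih, h1, h2, pvOrNone, pvOrSome]
      · have h1 : List.findSome? pvFD [line] = none := by
          simp only [List.findSome?_cons, List.findSome?_nil, pvFD]
          rw [if_neg hd]
        have h2 : List.findSome? pvFR [line] = none := by
          simp only [List.findSome?_cons, List.findSome?_nil, pvFR]
          rw [if_neg hd, if_neg hr]
        have hst : pvStepA (d, r) line = (d, r) := by
          simp only [pvStepA]; rw [if_neg hd, if_neg hr]
        rw [hst, ih, h1, h2, pvOrNone, pvOrNone]

theorem pvScanB_eq (ls : List String) (gd gr : Bool) (d r : String) :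
    pvScanB ls gd gr d r =
      ((if gd then d else (ls.findSome? pvFD).getD d),
       (if gr then r else (ls.findSome? pvFR).getD r)) := by
  induction ls generalizing gd gr d r with
  | nil => cases gd <;> cases gr <;> simp [pvScanB]
  | cons line rest ih =>
    rw [pvScanB]
    by_cases hb : (gd && gr) = true
    · rw [if_pos hb]
      obtain ⟨h1, h2⟩ := Bool.and_eq_true .. |>.mp hb
      simp [h1, h2]
    · rw [if_neg hb]
      by_cases hd : PySem.Str.startswith (PySem.Str.strip line) "Data:" = true
      · have hr := pvDisj _ hd
        replace hd : PySem.Chars.startswith (PySem.Chars.strip line.toList)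
            ['D','a','t','a',':'] = true := by simpa using hd
        replace hr : PySem.Chars.startswith (PySem.Chars.strip line.toList)
            ['R','e','s','u','l','t',':'] = false := by simpa using hr
        cases gd with
        | false => simp [pvFD, pvFR, hd, ih]
        | true =>
          have hgr : gr = false := by cases gr <;> simp_all
          simp [pvFR, hd, hr, hgr, ih]
      · by_cases hr : PySem.Str.startswith (PySem.Str.strip line) "Result:" = true
        · replace hd : PySem.Chars.startswith (PySem.Chars.strip line.toList)
              ['D','a','t','a',':'] = false := by simpa using hd
          replace hr : PySem.Chars.startswith (PySem.Chars.strip line.toList)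
              ['R','e','s','u','l','t',':'] = true := by simpa using hr
          cases gr with
          | false => simp [pvFD, pvFR, hd, hr, ih]
          | true =>
            have hgd : gd = false := by cases gd <;> simp_all
            simp [pvFD, hd, hr, hgd, ih]
        · replace hd : PySem.Chars.startswith (PySem.Chars.strip line.toList)
              ['D','a','t','a',':'] = false := by simpa using hd
          replace hr : PySem.Chars.startswith (PySem.Chars.strip line.toList)
              ['R','e','s','u','l','t',':'] = false := by simpa using hr
          simp [pvFD, pvFR, hd, hr, ih]

-- ===== VERDICT (by name: the statement is the Claim_ definition above) =====
theorem parse_telnet_output_spec : Claim_equal_parse_telnet_output := by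
  intro output _
  unfold Spec_parse_telnet_output parse_telnet_output parse_telnet_output_alt
  by_cases h : output = ""
  · simp [h]
  · rw [if_neg h, if_neg h, pvFoldA, pvScanB_eq]
    simp only [Bool.false_eq_true, if_false]
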